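-- pv_equiv track=rewrite | github.com/liuky74/mark_tools | video_mark.py | make_ids
-- ===== SOURCE A (Python) =====
-- def make_ids(frame_idx):
--     frame_ids = []
--     # for stride in range(12):
--     #     # frame_idx-=stride*2
--     #     frame_ids.append(frame_idx-stride*2)
--
--     frame_ids.append(frame_idx)
--     for stride in range(5):
--         frame_idx-= 2
--         frame_ids.append(frame_idx)
--     for stride in range(4,4+6):
--         frame_idx-= stride
--         frame_ids.append(frame_idx)
--
--
--     frame_ids.reverse()
--     return frame_ids
-- ===== SOURCE B (Python) =====
-- # Cumulative decrement offsets of the schedule, already in output (reversed) order.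
-- OFFSETS = [49, 40, 32, 25, 19, 14, 10, 8, 6, 4, 2, 0]
--
-- def make_ids(frame_idx):
--     return [frame_idx - d for d in OFFSETS]
-- ===== Notes on version B (the rewrite author's own statement) =====
-- stated objective: simpler
-- what changed: Replaces the two stateful subtract-loops with a running accumulator plus a final reverse by a single map of frame_idx over a precomputed constant offset table already in output order.
import Mathlib
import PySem

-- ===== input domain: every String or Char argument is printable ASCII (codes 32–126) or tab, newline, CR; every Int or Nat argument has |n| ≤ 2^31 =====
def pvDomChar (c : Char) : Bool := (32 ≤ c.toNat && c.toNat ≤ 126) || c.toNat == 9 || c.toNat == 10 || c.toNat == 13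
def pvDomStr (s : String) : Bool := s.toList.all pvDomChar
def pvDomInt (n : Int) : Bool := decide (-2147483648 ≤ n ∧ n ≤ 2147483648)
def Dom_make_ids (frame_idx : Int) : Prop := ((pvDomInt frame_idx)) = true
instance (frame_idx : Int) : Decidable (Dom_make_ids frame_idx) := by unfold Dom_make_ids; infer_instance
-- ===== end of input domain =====

-- ===== PORT A =====
-- Literal port of A: append frame_idx, two foldl loops over pyRange mutating
-- (frame_idx, frame_ids), then reverse.
def make_ids (frame_idx : Int) : List Int :=
  let frame_ids : List Int := []
  let frame_ids := frame_ids ++ [frame_idx]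
  let st := (PySem.List.pyRange 0 5 1).foldl
    (fun (st : Int × List Int) (_stride : Int) =>
      let fi := st.1 - 2
      (fi, st.2 ++ [fi])) (frame_idx, frame_ids)
  let st := (PySem.List.pyRange 4 (4+6) 1).foldl
    (fun (st : Int × List Int) (stride : Int) =>
      let fi := st.1 - stride
      (fi, st.2 ++ [fi])) st
  st.2.reverse

-- ===== PORT B =====
-- B: map over the constant offset table (cumulative decrements, reversed order).
def pvOffsets : List Int := [49, 40, 32, 25, 19, 14, 10, 8, 6, 4, 2, 0]

def make_ids_alt (frame_idx : Int) : List Int :=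
  pvOffsets.map (fun d => frame_idx - d)

-- ===== PRECONDITION & SPEC =====
def Spec_make_ids (frame_idx : Int) (out : List Int) : Prop := out = make_ids_alt frame_idx
instance (frame_idx : Int) (out : List Int) : Decidable (Spec_make_ids frame_idx out) := by unfold Spec_make_ids; infer_instance

-- ===== CLAIM (what is proved, stated in full; the proofs are below) =====
def Claim_equal_make_ids : Prop := ∀ (frame_idx : Int), Dom_make_ids frame_idx → Spec_make_ids frame_idx (make_ids frame_idx)

-- ===== LEMMAS AND PROOFS =====

-- ===== VERDICT (by name: the statement is the Claim_ definition above) =====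
theorem make_ids_spec : Claim_equal_make_ids := by
  intro frame_idx _
  unfold Spec_make_ids make_ids make_ids_alt pvOffsets
  simp [PySem.List.pyRange, List.range_succ]
  omega
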